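-- pv_equiv track=rewrite | github.com/PedroMTQ/mantis | source/MANTIS_Consensus.py | remove_unspecific_identifiers
-- ===== SOURCE A (Python) =====
-- def remove_unspecific_identifiers(identifiers, specificity_threshold=10):
--     res = set()
--     dict_counter = {}
--     for i in identifiers:
--         link_type = i.split(':')[0]
--         if link_type not in dict_counter: dict_counter[link_type] = 0
--         dict_counter[link_type] += 1
--     for i in identifiers:
--         link_type = i.split(':')[0]
--         if dict_counter[link_type] <= specificity_threshold:
--             res.add(i)
--     return res
-- ===== SOURCE B (Python) =====
-- def remove_unspecific_identifiers(identifiers, specificity_threshold=10):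
--     # Sort the type prefixes, find over-threshold ("unspecific") prefixes by
--     # scanning runs of equal prefixes in the sorted order, then keep every
--     # identifier whose prefix is not unspecific.
--     prefixes = sorted(i.split(':')[0] for i in identifiers)
--     unspecific = set()
--     run_val = None
--     run_len = 0
--     for p in prefixes:
--         if p == run_val:
--             run_len += 1
--         else:
--             if run_val is not None and run_len > specificity_threshold:
--                 unspecific.add(run_val)
--             run_val = p
--             run_len = 1
--     if run_val is not None and run_len > specificity_threshold:
--         unspecific.add(run_val)
--     res = set()
--     for i in identifiers:
--         if i.split(':')[0] not in unspecific:
--             res.add(i)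
--     return res
-- ===== Notes on version B (the rewrite author's own statement) =====
-- stated objective: alternative
-- what changed: B replaces A's hash-counter entirely: it sorts the type prefixes, detects over-threshold prefixes by a run-length scan over the sorted sequence, and keeps every identifier whose prefix is not in that set (sort-then-scan instead of dict counting).
import Mathlib
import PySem

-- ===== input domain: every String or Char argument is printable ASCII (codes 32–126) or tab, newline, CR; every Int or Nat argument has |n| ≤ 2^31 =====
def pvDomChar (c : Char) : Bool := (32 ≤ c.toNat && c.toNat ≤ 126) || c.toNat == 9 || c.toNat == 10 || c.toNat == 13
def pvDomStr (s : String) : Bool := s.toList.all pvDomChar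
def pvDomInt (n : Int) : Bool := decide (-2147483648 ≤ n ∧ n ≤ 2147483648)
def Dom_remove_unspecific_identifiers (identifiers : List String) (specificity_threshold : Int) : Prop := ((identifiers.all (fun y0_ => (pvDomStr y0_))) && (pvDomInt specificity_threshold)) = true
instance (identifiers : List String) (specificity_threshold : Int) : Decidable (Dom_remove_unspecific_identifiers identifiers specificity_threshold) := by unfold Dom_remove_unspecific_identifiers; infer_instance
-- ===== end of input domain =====

-- B replaces A's hash-counter by sort-then-scan: sort the prefixes, find the over-threshold
-- ("unspecific") prefixes by a run-length scan of the sorted sequence, keep the rest (objective: alternative).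
-- Both Pythons return a set; its Lean value is the distinct kept identifiers in first-insertion order.

-- i.split(':')[0]: split with a non-empty separator always returns at least one piece,
-- so the [0] index is exactly the head (never an IndexError).
def linkTypeOf (i : String) : String := (((PySem.Str.split? i ":").getD []).headD "")

-- ===== PORT A =====
def remove_unspecific_identifiers (identifiers : List String) (specificity_threshold : Int) : List String :=
  -- res = set(); dict_counter = {}
  -- first loop: presence check, then dict_counter[link_type] += 1
  let dict_counter : PySem.Dict String Int :=
    identifiers.foldl (fun d i =>
      let link_type := linkTypeOf i
      let d := if d.contains link_type then d else d.insert link_type 0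
      d.insert link_type (d.getD link_type 0 + 1)) PySem.Dict.empty
  -- second loop: res.add(i) when the counter is within the threshold
  identifiers.foldl (fun res i =>
    let link_type := linkTypeOf i
    if dict_counter.getD link_type 0 ≤ specificity_threshold then PySem.Set.add res i else res)
    PySem.Set.empty

-- ===== PORT B =====
-- scan state: (unspecific-so-far, run_val, run_len); run_val = none only before the first element
def pvFlush (t : Int) (acc : PySem.Set String × Option String × Int) : PySem.Set String :=
  match acc.2.1 with
  | some q => if t < acc.2.2 then PySem.Set.add acc.1 q else acc.1
  | none => acc.1

def pvScanStep (t : Int) (acc : PySem.Set String × Option String × Int) (p : String) :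
    PySem.Set String × Option String × Int :=
  if acc.2.1 = some p then (acc.1, acc.2.1, acc.2.2 + 1)
  else (pvFlush t acc, some p, 1)

def remove_unspecific_identifiers_alt (identifiers : List String) (specificity_threshold : Int) : List String :=
  -- prefixes = sorted(i.split(':')[0] for i in identifiers)
  let prefixes := PySem.List.sorted (identifiers.map linkTypeOf) (fun x => x) false
  -- run-length scan of the sorted prefixes, plus the final flush
  let st := prefixes.foldl (pvScanStep specificity_threshold) (PySem.Set.empty, none, 0)
  let unspecific := pvFlush specificity_threshold st
  -- res = {i for i in identifiers if i.split(':')[0] not in unspecific}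
  identifiers.foldl (fun res i =>
    if unspecific.contains (linkTypeOf i) then res else PySem.Set.add res i)
    PySem.Set.empty

-- ===== PRECONDITION & SPEC =====
def Spec_remove_unspecific_identifiers (identifiers : List String) (specificity_threshold : Int) (out : List String) : Prop := out = remove_unspecific_identifiers_alt identifiers specificity_threshold
instance (identifiers : List String) (specificity_threshold : Int) (out : List String) : Decidable (Spec_remove_unspecific_identifiers identifiers specificity_threshold out) := by unfold Spec_remove_unspecific_identifiers; infer_instance

-- ===== CLAIM (what is proved, stated in full; the proofs are below) =====
def Claim_equal_remove_unspecific_identifiers : Prop := ∀ (identifiers : List String) (specificity_threshold : Int), Dom_remove_unspecific_identifiers identifiers specificity_threshold → Spec_remove_unspecific_identifiers identifiers specificity_threshold (remove_unspecific_identifiers identifiers specificity_threshold)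

-- ===== LEMMAS AND PROOFS =====

-- A's counter loop counts occurrences of each prefix.
theorem counterA_getD (l : List String) (d : PySem.Dict String Int) (p : String) :
    (l.foldl (fun d i =>
      let link_type := linkTypeOf i
      let d := if d.contains link_type then d else d.insert link_type 0
      d.insert link_type (d.getD link_type 0 + 1)) d).getD p 0
      = d.getD p 0 + (l.countP (fun i => linkTypeOf i == p) : Int) := by
  induction l generalizing d with
  | nil => simp
  | cons x t ih =>
    simp only [List.foldl_cons, List.countP_cons, ih]
    by_cases hc : d.contains (linkTypeOf x) = true
    · rw [if_pos hc]
      by_cases hx : linkTypeOf x = p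
      · subst hx
        rw [PySem.Dict.getD_insert_self]; simp; omega
      · rw [PySem.Dict.getD_insert_of_ne _ _ _ (Ne.symm hx)]; simp [hx]
    · rw [if_neg hc]
      by_cases hx : linkTypeOf x = p
      · subst hx
        rw [PySem.Dict.getD_insert_self, PySem.Dict.getD_insert_self,
          PySem.Dict.getD_of_not_contains d 0 (by simpa using hc)]
        simp; omega
      · rw [PySem.Dict.getD_insert_of_ne _ _ _ (Ne.symm hx),
          PySem.Dict.getD_insert_of_ne _ _ _ (Ne.symm hx)]
        simp [hx]

-- the two shapes of a scan step / a flush (definitional)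
theorem pvFlush_some (t : Int) (s : PySem.Set String) (v : String) (n : Int) :
    pvFlush t (s, some v, n) = (if t < n then PySem.Set.add s v else s) := rfl

theorem pvScanStep_same (t : Int) (s : PySem.Set String) (v : String) (n : Int) :
    pvScanStep t (s, some v, n) v = (s, some v, n + 1) := by simp [pvScanStep]

theorem pvScanStep_new (t : Int) (s : PySem.Set String) (v p : String) (h : v ≠ p) :
    pvScanStep t (s, some v, n) p = (pvFlush t (s, some v, n), some p, 1) := by
  simp [pvScanStep, h]

theorem pvScanStep_first (t : Int) (s : PySem.Set String) (n : Int) (p : String) :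
    pvScanStep t (s, none, n) p = (s, some p, 1) := by simp [pvScanStep, pvFlush]

-- The run-length scan on a sorted tail, with the running state generalized:
-- v is the current run's value (≤ everything still to come), n its length so far.
theorem scan_mem (t : Int) (q : String) :
    ∀ (ps : List String), ps.Pairwise (· ≤ ·) →
    ∀ (s : PySem.Set String) (v : String) (n : Int), (∀ x ∈ ps, v ≤ x) →
    (q ∈ pvFlush t (ps.foldl (pvScanStep t) (s, some v, n)) ↔
      q ∈ s ∨ (q = v ∧ t < n + (ps.countP (· == v) : Int)) ∨
        (q ≠ v ∧ q ∈ ps ∧ t < (ps.countP (· == q) : Int))) := by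
  intro ps
  induction ps with
  | nil =>
    intro _ s v n _
    simp only [List.foldl_nil, pvFlush_some, List.countP_nil, List.not_mem_nil]
    split_ifs with h
    · simp only [PySem.Set.mem_add]
      constructor
      · rintro (h1 | h1)
        · exact Or.inl h1
        · exact Or.inr (Or.inl ⟨h1, by omega⟩)
      · rintro (h1 | ⟨h1, _⟩ | ⟨_, h2, _⟩)
        · exact Or.inl h1
        · exact Or.inr h1
        · exact absurd h2 (by simp)
    · constructor
      · exact fun h1 => Or.inl h1
      · rintro (h1 | ⟨_, h2⟩ | ⟨_, h2, _⟩)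
        · exact h1
        · omega
        · exact absurd h2 (by simp)
  | cons p ps' ih =>
    intro hpw s v n hv
    have hpw' : ps'.Pairwise (· ≤ ·) := hpw.tail
    have hple : ∀ x ∈ ps', p ≤ x := fun x hx => (List.pairwise_cons.mp hpw).1 x hx
    by_cases hvp : v = p
    · subst hvp
      rw [List.foldl_cons, pvScanStep_same, ih hpw' s v (n + 1) hple]
      have hcc : (v :: ps').countP (· == v) = ps'.countP (· == v) + 1 := by
        simp
      constructor
      · rintro (h1 | ⟨h1, h2⟩ | ⟨h1, h2, h3⟩)
        · exact Or.inl h1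
        · refine Or.inr (Or.inl ⟨h1, ?_⟩); rw [hcc]; push_cast at h2 ⊢; omega
        · refine Or.inr (Or.inr ⟨h1, List.mem_cons_of_mem _ h2, ?_⟩)
          have hvq : (v == q) = false := by simp [Ne.symm h1]
          simpa [List.countP_cons, hvq] using h3
      · rintro (h1 | ⟨h1, h2⟩ | ⟨h1, h2, h3⟩)
        · exact Or.inl h1
        · refine Or.inr (Or.inl ⟨h1, ?_⟩); rw [hcc] at h2; push_cast at h2 ⊢; omega
        · rcases List.mem_cons.mp h2 with rfl | h2'
          · exact absurd rfl h1
          · refine Or.inr (Or.inr ⟨h1, h2', ?_⟩)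
            have hvq : (v == q) = false := by simp [Ne.symm h1]
            simpa [List.countP_cons, hvq] using h3
    · -- v < p: the run of v is over and gets flushed
      have hvltp : v < p := lt_of_le_of_ne (hv p (List.mem_cons_self ..)) hvp
      have hvnot : ∀ x ∈ ps', v ≠ x := fun x hx => ne_of_lt (lt_of_lt_of_le hvltp (hple x hx))
      have hpv : (p == v) = false := by simp [Ne.symm hvp]
      have hcv : (p :: ps').countP (· == v) = 0 := by
        rw [List.countP_cons]
        have : ps'.countP (· == v) = 0 :=
          List.countP_eq_zero.mpr (fun x hx => by simp [Ne.symm (hvnot x hx)])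
        simp [this, hpv]
      rw [List.foldl_cons, pvScanStep_new t s v p hvp, ih hpw' _ p 1 hple, pvFlush_some]
      constructor
      · rintro (h1 | ⟨h1, h2⟩ | ⟨h1, h2, h3⟩)
        · split_ifs at h1 with ht
          · rcases (PySem.Set.mem_add s v q).mp h1 with h1 | h1
            · exact Or.inl h1
            · refine Or.inr (Or.inl ⟨h1, ?_⟩); rw [hcv]; push_cast; omega
          · exact Or.inl h1
        · subst h1
          refine Or.inr (Or.inr ⟨Ne.symm hvp, List.mem_cons_self .., ?_⟩)
          have : (q :: ps').countP (· == q) = ps'.countP (· == q) + 1 := by simp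
          rw [this]; push_cast at h2 ⊢; omega
        · refine Or.inr (Or.inr ⟨fun hqv => hvnot q h2 hqv.symm, List.mem_cons_of_mem _ h2, ?_⟩)
          have hpq : (p == q) = false := beq_eq_false_iff_ne.mpr (fun h => h1 h.symm)
          simpa [List.countP_cons, hpq] using h3
      · rintro (h1 | ⟨h1, h2⟩ | ⟨h1, h2, h3⟩)
        · refine Or.inl ?_
          split_ifs with ht
          · exact (PySem.Set.mem_add s v q).mpr (Or.inl h1)
          · exact h1
        · subst h1
          rw [hcv] at h2
          refine Or.inl ?_
          rw [if_pos (by push_cast at h2; omega)]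
          exact (PySem.Set.mem_add s q q).mpr (Or.inr rfl)
        · by_cases hqp : q = p
          · subst hqp
            refine Or.inr (Or.inl ⟨rfl, ?_⟩)
            have : (q :: ps').countP (· == q) = ps'.countP (· == q) + 1 := by
              simp
            rw [this] at h3; push_cast at h3 ⊢; omega
          · rcases List.mem_cons.mp h2 with rfl | h2'
            · exact absurd rfl hqp
            · refine Or.inr (Or.inr ⟨hqp, h2', ?_⟩)
              have hpq : (p == q) = false := by simp [Ne.symm hqp]
              simpa [List.countP_cons, hpq] using h3

-- membership in the finished unspecific set
theorem unspecific_mem (t : Int) (ps : List String) (hpw : ps.Pairwise (· ≤ ·)) (q : String) :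
    q ∈ pvFlush t (ps.foldl (pvScanStep t) (PySem.Set.empty, none, 0)) ↔
      q ∈ ps ∧ t < (ps.countP (· == q) : Int) := by
  cases ps with
  | nil => simp [pvFlush, PySem.Set.empty]
  | cons p ps' =>
    rw [List.foldl_cons, pvScanStep_first]
    rw [scan_mem t q ps' hpw.tail _ p 1 (fun x hx => (List.pairwise_cons.mp hpw).1 x hx)]
    simp only [List.countP_cons, List.mem_cons]
    constructor
    · rintro (h1 | ⟨h1, h2⟩ | ⟨h1, h2, h3⟩)
      · exact absurd h1 (by simp [PySem.Set.empty])
      · subst h1; exact ⟨Or.inl rfl, by simp at h2 ⊢; omega⟩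
      · refine ⟨Or.inr h2, ?_⟩
        have : (p == q) = false := beq_eq_false_iff_ne.mpr (fun h => h1 h.symm)
        simpa [this] using h3
    · rintro ⟨h1, h2⟩
      by_cases hq : q = p
      · subst hq
        exact Or.inr (Or.inl ⟨rfl, by simp at h2 ⊢; omega⟩)
      · rcases h1 with rfl | h1
        · exact absurd rfl hq
        · refine Or.inr (Or.inr ⟨hq, h1, ?_⟩)
          have : (p == q) = false := by simp [Ne.symm hq]
          simpa [this] using h2

-- ===== VERDICT (by name: the statement is the Claim_ definition above) =====
theorem remove_unspecific_identifiers_spec : Claim_equal_remove_unspecific_identifiers := by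
  intro identifiers t _
  unfold Spec_remove_unspecific_identifiers
  unfold remove_unspecific_identifiers remove_unspecific_identifiers_alt
  simp only []
  set ps := PySem.List.sorted (identifiers.map linkTypeOf) (fun x => x) false with hps
  have hperm : ps.Perm (identifiers.map linkTypeOf) := PySem.List.sorted_perm _ _ _
  have hpw : ps.Pairwise (· ≤ ·) := by
    simpa using PySem.List.sorted_pairwise (identifiers.map linkTypeOf) (fun x => x)
  apply PySem.List.foldl_congr_mem
  intro acc i hi
  have hq : linkTypeOf i ∈ ps := hperm.mem_iff.mpr (List.mem_map_of_mem hi)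
  have hcnt : (ps.countP (· == linkTypeOf i) : Int)
      = (identifiers.countP (fun j => linkTypeOf j == linkTypeOf i) : Int) := by
    rw [hperm.countP_eq, List.countP_map]; rfl
  have hcond : (pvFlush t (ps.foldl (pvScanStep t) (PySem.Set.empty, none, 0))).contains (linkTypeOf i) = true
      ↔ t < (identifiers.countP (fun j => linkTypeOf j == linkTypeOf i) : Int) := by
    rw [PySem.Set.contains_iff, unspecific_mem t ps hpw, hcnt]
    exact ⟨fun h => h.2, fun h => ⟨hq, h⟩⟩
  have hcount : ((identifiers.foldl (fun d i =>
      let link_type := linkTypeOf i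
      let d := if d.contains link_type then d else d.insert link_type 0
      d.insert link_type (d.getD link_type 0 + 1)) PySem.Dict.empty).getD (linkTypeOf i) 0)
      = (identifiers.countP (fun j => linkTypeOf j == linkTypeOf i) : Int) := by
    rw [counterA_getD, PySem.Dict.getD_empty]; ring
  by_cases h : t < (identifiers.countP (fun j => linkTypeOf j == linkTypeOf i) : Int)
  · rw [if_neg (by rw [hcount]; omega), if_pos (hcond.mpr h)]
  · rw [if_pos (by rw [hcount]; omega), if_neg (fun hh => h (hcond.mp hh))]
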